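-- pv_equiv track=rewrite | github.com/RockPiryt/Graphs_Algorithms | 7.Kolorowanie/oddane/stepikAlgoLF.py | sort_vertices_by_degree
-- ===== SOURCE A (Python) =====
-- def sort_vertices_by_degree(adjacency_list):
--
--     # Tworzenie listy wierzchołków z ich stopniami
--     vertices = [(vertex, len(neighbors)) for vertex, neighbors in adjacency_list.items()]
--
--     # Funkcja QuickSort do sortowania listy wierzchołków
--     def quicksort(arr):
--         if len(arr) <= 1:
--             return arr
--         pivot = arr[len(arr) // 2]
--         left = [x for x in arr if x[1] > pivot[1] or (x[1] == pivot[1] and x[0] > pivot[0])]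
--         middle = [x for x in arr if x == pivot]
--         right = [x for x in arr if x[1] < pivot[1] or (x[1] == pivot[1] and x[0] < pivot[0])]
--         return quicksort(left) + middle + quicksort(right)
--
--     # Sortuj wierzchołki
--     sorted_vertices = quicksort(vertices)
--
--     return {vertex: degree for vertex, degree in sorted_vertices}
-- ===== SOURCE B (Python) =====
-- def sort_vertices_by_degree(adjacency_list):
--     # Swap each entry to a (degree, vertex) tuple, reverse-sort those tuples
--     # lexicographically with the built-in sort, and swap back into a dict.
--     pairs = sorted(((len(ns), v) for v, ns in adjacency_list.items()), reverse=True)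
--     return {v: d for d, v in pairs}
-- ===== Notes on version B (the rewrite author's own statement) =====
-- stated objective: faster
-- what changed: Replaces the hand-written recursive three-way quicksort over (vertex, degree) pairs by swapping each entry to a (degree, vertex) tuple, one built-in lexicographic reverse sort, and swapping back into a dict.
import Mathlib
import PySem

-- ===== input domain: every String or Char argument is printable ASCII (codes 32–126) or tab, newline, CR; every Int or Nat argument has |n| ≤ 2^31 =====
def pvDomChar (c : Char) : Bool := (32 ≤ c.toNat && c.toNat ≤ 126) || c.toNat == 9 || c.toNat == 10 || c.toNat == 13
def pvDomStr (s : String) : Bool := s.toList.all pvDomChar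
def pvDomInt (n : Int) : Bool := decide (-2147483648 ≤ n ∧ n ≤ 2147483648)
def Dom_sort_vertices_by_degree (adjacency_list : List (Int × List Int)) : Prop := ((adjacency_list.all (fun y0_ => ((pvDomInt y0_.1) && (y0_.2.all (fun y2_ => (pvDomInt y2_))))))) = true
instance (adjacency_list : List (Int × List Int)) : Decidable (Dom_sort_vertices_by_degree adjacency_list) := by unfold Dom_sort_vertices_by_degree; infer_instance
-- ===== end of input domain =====

-- B replaces A's hand-written recursive three-way quicksort of (vertex, degree) pairs by one
-- built-in lexicographic reverse sort of the swapped (degree, vertex) tuples (objective: faster; a timing run measured the built-in sort several times faster).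

-- ===== PORT A =====
-- A-side helpers: the two comparison predicates of A's quicksort partition, and A's inner
-- quicksort transcribed step for step (pivot = middle element, three filter passes).
def pvLeftP (pivot x : Int × Int) : Bool :=
  decide (x.2 > pivot.2) || (decide (x.2 = pivot.2) && decide (x.1 > pivot.1))
def pvRightP (pivot x : Int × Int) : Bool :=
  decide (x.2 < pivot.2) || (decide (x.2 = pivot.2) && decide (x.1 < pivot.1))
theorem pv_left_dec (arr : List (Int × Int)) (h : ¬ arr.length ≤ 1) :
    (List.filter (fun x : {x // x ∈ arr} => pvLeftP (arr.getD (arr.length / 2) (0, 0)) x.1)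
      arr.attach).unattach.length < arr.length := by
  simpa using List.length_filter_lt_length_iff_exists.mpr
    ⟨arr.getD (arr.length / 2) (0, 0),
     by rw [List.getD_eq_getElem _ _ (by omega)]; exact List.getElem_mem _,
     by simp [pvLeftP]⟩

theorem pv_right_dec (arr : List (Int × Int)) (h : ¬ arr.length ≤ 1) :
    (List.filter (fun x : {x // x ∈ arr} => pvRightP (arr.getD (arr.length / 2) (0, 0)) x.1)
      arr.attach).unattach.length < arr.length := by
  simpa using List.length_filter_lt_length_iff_exists.mpr
    ⟨arr.getD (arr.length / 2) (0, 0),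
     by rw [List.getD_eq_getElem _ _ (by omega)]; exact List.getElem_mem _,
     by simp [pvRightP]⟩

-- A's inner quicksort, step for step (indexing arr[len(arr)//2] is total here: the
-- length is ≥ 2 in this branch, so getD never uses its default)
def pvQuicksort (arr : List (Int × Int)) : List (Int × Int) :=
  if h : arr.length ≤ 1 then arr
  else
    let pivot := arr.getD (arr.length / 2) (0, 0)
    let left := arr.filter (fun x => pvLeftP pivot x)
    let middle := arr.filter (fun x => x == pivot)
    let right := arr.filter (fun x => pvRightP pivot x)
    pvQuicksort left ++ middle ++ pvQuicksort right
termination_by arr.length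
decreasing_by
  · exact pv_left_dec arr h
  · exact pv_right_dec arr h

def sort_vertices_by_degree (adjacency_list : List (Int × List Int)) : List (Int × Int) :=
  let vertices := (PySem.Dict.ofList adjacency_list).items.map
    (fun p => (p.1, (p.2.length : Int)))
  let sorted_vertices := pvQuicksort vertices
  (PySem.Dict.ofList sorted_vertices).items

-- ===== PORT B =====
def sort_vertices_by_degree_alt (adjacency_list : List (Int × List Int)) : List (Int × Int) :=
  let pairs := PySem.List.sorted
    ((PySem.Dict.ofList adjacency_list).items.map (fun p => ((p.2.length : Int), p.1)))
    (fun q => toLex q) true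
  (PySem.Dict.ofList (pairs.map (fun q => (q.2, q.1)))).items

-- ===== PRECONDITION & SPEC =====
def Spec_sort_vertices_by_degree (adjacency_list : List (Int × List Int)) (out : List (Int × Int)) : Prop := out = sort_vertices_by_degree_alt adjacency_list
instance (adjacency_list : List (Int × List Int)) (out : List (Int × Int)) : Decidable (Spec_sort_vertices_by_degree adjacency_list out) := by unfold Spec_sort_vertices_by_degree; infer_instance

-- ===== CLAIM (what is proved, stated in full; the proofs are below) =====
def Claim_equal_sort_vertices_by_degree : Prop := ∀ (adjacency_list : List (Int × List Int)), Dom_sort_vertices_by_degree adjacency_list → Spec_sort_vertices_by_degree adjacency_list (sort_vertices_by_degree adjacency_list)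

-- ===== LEMMAS AND PROOFS =====

-- the strict "comes before" order realised by A's comparisons: degree desc, then vertex desc
def pvR (a b : Int × Int) : Prop := b.2 < a.2 ∨ (b.2 = a.2 ∧ b.1 < a.1)

theorem pv_partition_perm (pivot : Int × Int) (arr : List (Int × Int)) :
    ((arr.filter (fun x => pvLeftP pivot x) ++ arr.filter (fun x => x == pivot)) ++
      arr.filter (fun x => pvRightP pivot x)).Perm arr := by
  induction arr with
  | nil => simp
  | cons a t ih =>
    by_cases hm : a = pivot
    · subst hm
      have hl : pvLeftP a a = false := by simp [pvLeftP]
      have hr : pvRightP a a = false := by simp [pvRightP]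
      have hb : (a == a) = true := by simp
      simp only [List.filter_cons, hl, hb, hr, if_true, if_false, Bool.false_eq_true]
      exact (List.perm_middle.append_right _).trans (ih.cons a)
    · have hb : (a == pivot) = false := by simpa using hm
      have hlr : pvLeftP pivot a = true ∨ pvRightP pivot a = true := by
        rcases lt_trichotomy a.2 pivot.2 with h|h|h
        · exact Or.inr (by simp [pvRightP]; omega)
        · rcases lt_trichotomy a.1 pivot.1 with h1|h1|h1
          · exact Or.inr (by simp [pvRightP]; omega)
          · exact absurd (Prod.ext h1 h) hm
          · exact Or.inl (by simp [pvLeftP]; omega)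
        · exact Or.inl (by simp [pvLeftP]; omega)
      rcases hlr with hl | hr
      · have hr : pvRightP pivot a = false := by simp [pvLeftP] at hl; simp [pvRightP]; omega
        simp only [List.filter_cons, hl, hb, hr, if_true, if_false, Bool.false_eq_true]
        exact ih.cons a
      · have hl : pvLeftP pivot a = false := by simp [pvRightP] at hr; simp [pvLeftP]; omega
        simp only [List.filter_cons, hl, hb, hr, if_true, if_false, Bool.false_eq_true]
        exact List.perm_middle.trans (ih.cons a)

theorem pvQuicksort_perm_aux (n : Nat) : ∀ arr : List (Int × Int), arr.length ≤ n → (pvQuicksort arr).Perm arr := by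
  induction n with
  | zero =>
    intro arr hlen
    rw [pvQuicksort]
    simp only [dif_pos (by omega : arr.length ≤ 1)]
    exact List.Perm.refl arr
  | succ n ih =>
    intro arr hlen
    rw [pvQuicksort]
    split
    · exact List.Perm.refl arr
    · rename_i h
      have hmem : (arr.getD (arr.length / 2) (0, 0)) ∈ arr := by
        rw [List.getD_eq_getElem _ _ (by omega)]; exact List.getElem_mem _
      have hL : (arr.filter (fun x => pvLeftP ((arr.getD (arr.length / 2) (0, 0))) x)).length < arr.length :=
        List.length_filter_lt_length_iff_exists.mpr ⟨_, hmem, by simp [pvLeftP]⟩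
      have hR : (arr.filter (fun x => pvRightP ((arr.getD (arr.length / 2) (0, 0))) x)).length < arr.length :=
        List.length_filter_lt_length_iff_exists.mpr ⟨_, hmem, by simp [pvRightP]⟩
      exact (((ih _ (by omega)).append (List.Perm.refl _)).append (ih _ (by omega))).trans
        (pv_partition_perm _ arr)

theorem pvQuicksort_perm (arr : List (Int × Int)) : (pvQuicksort arr).Perm arr :=
  pvQuicksort_perm_aux arr.length arr le_rfl

theorem pvLeftP_R {p x : Int × Int} (h : pvLeftP p x = true) : pvR x p := by
  simp [pvLeftP] at h; simp [pvR]; omega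

theorem pvRightP_R {p x : Int × Int} (h : pvRightP p x = true) : pvR p x := by
  simp [pvRightP] at h; simp [pvR]; omega

theorem pvR_trans {a p b : Int × Int} (h1 : pvR a p) (h2 : pvR p b) : pvR a b := by
  simp [pvR] at *; omega

theorem pvQuicksort_pairwise_aux (n : Nat) : ∀ arr : List (Int × Int), arr.length ≤ n →
    (arr.map Prod.fst).Nodup → (pvQuicksort arr).Pairwise pvR := by
  induction n with
  | zero =>
    intro arr hlen hnd
    rw [pvQuicksort]
    simp only [dif_pos (by omega : arr.length ≤ 1)]
    have : arr = [] := List.eq_nil_of_length_eq_zero (by omega)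
    subst this; exact List.Pairwise.nil
  | succ n ih =>
    intro arr hlen hnd
    rw [pvQuicksort]
    split
    · rename_i h
      match arr, h with
      | [], _ => exact List.Pairwise.nil
      | [a], _ => simp
    · rename_i h
      have hmem : (arr.getD (arr.length / 2) (0, 0)) ∈ arr := by
        rw [List.getD_eq_getElem _ _ (by omega)]; exact List.getElem_mem _
      have hL : (arr.filter (fun x => pvLeftP ((arr.getD (arr.length / 2) (0, 0))) x)).length < arr.length :=
        List.length_filter_lt_length_iff_exists.mpr ⟨_, hmem, by simp [pvLeftP]⟩
      have hR : (arr.filter (fun x => pvRightP ((arr.getD (arr.length / 2) (0, 0))) x)).length < arr.length :=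
        List.length_filter_lt_length_iff_exists.mpr ⟨_, hmem, by simp [pvRightP]⟩
      have hndL : ((arr.filter (fun x => pvLeftP ((arr.getD (arr.length / 2) (0, 0))) x)).map Prod.fst).Nodup :=
        hnd.sublist (List.filter_sublist.map Prod.fst)
      have hndR : ((arr.filter (fun x => pvRightP ((arr.getD (arr.length / 2) (0, 0))) x)).map Prod.fst).Nodup :=
        hnd.sublist (List.filter_sublist.map Prod.fst)
      have hndarr : arr.Nodup := hnd.of_map
      have hmid : arr.filter (fun x => x == (arr.getD (arr.length / 2) (0, 0))) = [(arr.getD (arr.length / 2) (0, 0))] := by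
        rw [show (fun x : Int × Int => x == (arr.getD (arr.length / 2) (0, 0))) = (· == (arr.getD (arr.length / 2) (0, 0))) from rfl,
            List.filter_beq, List.count_eq_one_of_mem hndarr hmem]
        rfl
      have memL : ∀ x ∈ pvQuicksort (arr.filter (fun x => pvLeftP ((arr.getD (arr.length / 2) (0, 0))) x)),
          pvLeftP ((arr.getD (arr.length / 2) (0, 0))) x = true := by
        intro x hx
        exact (List.mem_filter.mp ((pvQuicksort_perm _).mem_iff.mp hx)).2
      have memR : ∀ x ∈ pvQuicksort (arr.filter (fun x => pvRightP ((arr.getD (arr.length / 2) (0, 0))) x)),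
          pvRightP ((arr.getD (arr.length / 2) (0, 0))) x = true := by
        intro x hx
        exact (List.mem_filter.mp ((pvQuicksort_perm _).mem_iff.mp hx)).2
      dsimp only
      rw [hmid]
      refine List.pairwise_append.mpr ⟨List.pairwise_append.mpr ⟨ih _ (by omega) hndL, by simp, ?_⟩, ih _ (by omega) hndR, ?_⟩
      · intro a ha b hb
        have := pvLeftP_R (memL a ha)
        simp at hb
        subst hb
        exact this
      · intro a ha b hb
        rcases List.mem_append.mp ha with ha' | ha'
        · exact pvR_trans (pvLeftP_R (memL a ha')) (pvRightP_R (memR b hb))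
        · have : a = (arr.getD (arr.length / 2) (0, 0)) := by simpa using ha'
          subst this
          exact pvRightP_R (memR b hb)

theorem pvQuicksort_pairwise (arr : List (Int × Int)) (hnd : (arr.map Prod.fst).Nodup) :
    (pvQuicksort arr).Pairwise pvR :=
  pvQuicksort_pairwise_aux arr.length arr le_rfl hnd

theorem pv_main (al : List (Int × List Int)) :
    sort_vertices_by_degree al = sort_vertices_by_degree_alt al := by
  have hkeys : (((PySem.Dict.ofList al).items.map (fun p => (p.1, (p.2.length : Int)))).map Prod.fst).Nodup := by
    have h1 := PySem.Dict.nodup_keys_ofList al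
    simp only [PySem.Dict.keys] at h1
    simpa [List.map_map, Function.comp] using h1
  have hperm := pvQuicksort_perm ((PySem.Dict.ofList al).items.map (fun p => (p.1, (p.2.length : Int))))
  have hpw := pvQuicksort_pairwise _ hkeys
  have hkey : PySem.List.sorted
      ((PySem.Dict.ofList al).items.map (fun p => ((p.2.length : Int), p.1)))
      (fun q => toLex q) true
      = (pvQuicksort ((PySem.Dict.ofList al).items.map (fun p => (p.1, (p.2.length : Int))))).map
          (fun v => (v.2, v.1)) := by
    apply PySem.List.sorted_rev_eq_of_perm_of_pairwise_gt
    · have he : (PySem.Dict.ofList al).items.map (fun p => ((p.2.length : Int), p.1))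
          = ((PySem.Dict.ofList al).items.map (fun p => (p.1, (p.2.length : Int)))).map (fun v => (v.2, v.1)) := by
        simp [List.map_map]
      rw [he]
      exact hperm.map _
    · refine List.Pairwise.map _ ?_ hpw
      intro a b hab
      simpa [Prod.Lex.lt_iff, pvR] using hab
  show (PySem.Dict.ofList (pvQuicksort _)).items = (PySem.Dict.ofList (_)).items
  rw [hkey, List.map_map]
  have hswap : ((fun q : Int × Int => (q.2, q.1)) ∘ (fun v : Int × Int => (v.2, v.1))) = id := by
    funext q; rfl
  rw [hswap, List.map_id]

-- ===== VERDICT (by name: the statement is the Claim_ definition above) =====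
theorem sort_vertices_by_degree_spec : Claim_equal_sort_vertices_by_degree := by
  intro al _
  unfold Spec_sort_vertices_by_degree
  exact pv_main al
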